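-- pv_equiv track=rewrite | github.com/braindaamage/ac-race-engineer | backend/ac_engineer/engineer/agents.py | route_signals
-- ===== SOURCE A (Python) =====
-- SIGNAL_DOMAINS: dict[str, list[str]] = {
--     "high_understeer": ["balance"],
--     "high_oversteer": ["balance"],
--     "brake_balance_issue": ["balance", "technique"],
--     "suspension_bottoming": ["balance"],
--     "tyre_temp_spread_high": ["tyre"],
--     "tyre_temp_imbalance": ["tyre"],
--     "tyre_wear_rapid": ["tyre"],
--     "high_slip_angle": ["tyre"],
--     "low_consistency": ["technique"],
--     "lap_time_degradation": ["tyre"],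
-- }
--
-- DOMAIN_PRIORITY: dict[str, int] = {
--     "balance": 1,
--     "tyre": 2,
--     "aero": 3,
--     "technique": 4,
-- }
--
-- AERO_SECTIONS: set[str] = {
--     "WING_1", "WING_2", "WING_3", "WING_4",
--     "RIDE_HEIGHT_0", "RIDE_HEIGHT_1",
--     "RIDE_HEIGHT_LF", "RIDE_HEIGHT_RF", "RIDE_HEIGHT_LR", "RIDE_HEIGHT_RR",
-- }
--
-- _SETUP_DOMAINS = {"balance", "tyre"}
--
-- def route_signals(
--     signals: list[str],
--     setup_parameters: dict[str, dict[str, float | str]] | None = None,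
-- ) -> list[str]:
--     """Map detected signals to specialist domains.
--
--     Returns sorted list of unique domain names by priority (balance first).
--     Adds 'aero' if setup contains aero sections AND balance/tyre signals present.
--     """
--     domains: set[str] = set()
--
--     for signal in signals:
--         for domain in SIGNAL_DOMAINS.get(signal, []):
--             domains.add(domain)
--
--     # Aero detection: car has aero params AND has balance or tyre signals
--     if setup_parameters and domains & _SETUP_DOMAINS:
--         setup_sections = set(setup_parameters.keys())
--         if setup_sections & AERO_SECTIONS:
--             domains.add("aero")
--
--     return sorted(domains, key=lambda d: DOMAIN_PRIORITY.get(d, 99))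
-- ===== SOURCE B (Python) =====
-- AERO_SECTIONS: set[str] = {
--     "WING_1", "WING_2", "WING_3", "WING_4",
--     "RIDE_HEIGHT_0", "RIDE_HEIGHT_1",
--     "RIDE_HEIGHT_LF", "RIDE_HEIGHT_RF", "RIDE_HEIGHT_LR", "RIDE_HEIGHT_RR",
-- }
--
-- # Inverted index: for each domain, the signals that map to it.
-- _BALANCE_SIGNALS = {"high_understeer", "high_oversteer", "brake_balance_issue", "suspension_bottoming"}
-- _TYRE_SIGNALS = {"tyre_temp_spread_high", "tyre_temp_imbalance", "tyre_wear_rapid", "high_slip_angle", "lap_time_degradation"}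
-- _TECHNIQUE_SIGNALS = {"brake_balance_issue", "low_consistency"}
--
--
-- def route_signals(
--     signals: list[str],
--     setup_parameters: dict[str, dict[str, float | str]] | None = None,
-- ) -> list[str]:
--     """Map detected signals to specialist domains (priority order, balance first)."""
--     balance = any(s in _BALANCE_SIGNALS for s in signals)
--     tyre = any(s in _TYRE_SIGNALS for s in signals)
--     technique = any(s in _TECHNIQUE_SIGNALS for s in signals)
--     aero = (bool(setup_parameters) and (balance or tyre)
--             and any(k in AERO_SECTIONS for k in setup_parameters))
--     order = [("balance", balance), ("tyre", tyre), ("aero", aero), ("technique", technique)]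
--     return [domain for domain, flag in order if flag]
-- ===== Notes on version B (the rewrite author's own statement) =====
-- stated objective: idiomatic
-- what changed: Replaces the set accumulation over SIGNAL_DOMAINS plus a priority-key sort by an inverted signal->domain index (one any-membership test per domain) and a filter over the fixed priority order, so no set is built and no sort runs.
import Mathlib
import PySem

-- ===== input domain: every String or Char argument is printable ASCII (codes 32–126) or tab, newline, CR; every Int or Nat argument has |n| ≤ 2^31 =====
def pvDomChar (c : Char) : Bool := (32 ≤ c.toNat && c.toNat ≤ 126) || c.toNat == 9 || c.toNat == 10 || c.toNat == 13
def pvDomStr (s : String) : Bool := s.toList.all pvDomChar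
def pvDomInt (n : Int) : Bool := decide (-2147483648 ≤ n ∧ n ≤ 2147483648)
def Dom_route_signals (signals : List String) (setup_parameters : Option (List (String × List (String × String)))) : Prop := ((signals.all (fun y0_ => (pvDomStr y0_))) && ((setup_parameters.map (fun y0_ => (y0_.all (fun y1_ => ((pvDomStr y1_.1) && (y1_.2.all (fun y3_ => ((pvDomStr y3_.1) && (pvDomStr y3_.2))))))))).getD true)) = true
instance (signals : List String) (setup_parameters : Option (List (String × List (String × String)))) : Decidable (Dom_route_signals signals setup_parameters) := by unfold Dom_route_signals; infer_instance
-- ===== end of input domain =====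

-- B replaces the set accumulation + priority-key sort by an inverted signal->domain index and a
-- filter over the fixed priority order (idiomatic; no sort).

-- ===== PORT A =====
def SIGNAL_DOMAINS : PySem.Dict String (List String) := PySem.Dict.mk [
  ("high_understeer", ["balance"]),
  ("high_oversteer", ["balance"]),
  ("brake_balance_issue", ["balance", "technique"]),
  ("suspension_bottoming", ["balance"]),
  ("tyre_temp_spread_high", ["tyre"]),
  ("tyre_temp_imbalance", ["tyre"]),
  ("tyre_wear_rapid", ["tyre"]),
  ("high_slip_angle", ["tyre"]),
  ("low_consistency", ["technique"]),
  ("lap_time_degradation", ["tyre"])]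

def DOMAIN_PRIORITY : PySem.Dict String Int := PySem.Dict.mk [
  ("balance", 1), ("tyre", 2), ("aero", 3), ("technique", 4)]

def AERO_SECTIONS : PySem.Set String := PySem.Set.ofList [
  "WING_1", "WING_2", "WING_3", "WING_4",
  "RIDE_HEIGHT_0", "RIDE_HEIGHT_1",
  "RIDE_HEIGHT_LF", "RIDE_HEIGHT_RF", "RIDE_HEIGHT_LR", "RIDE_HEIGHT_RR"]

def SETUP_DOMAINS : PySem.Set String := PySem.Set.ofList ["balance", "tyre"]

def route_signals (signals : List String) (setup_parameters : Option (List (String × List (String × String)))) : List String :=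
  let domains : PySem.Set String :=
    signals.foldl (fun ds signal =>
      (SIGNAL_DOMAINS.getD signal []).foldl (fun ds domain => PySem.Set.add ds domain) ds)
      PySem.Set.empty
  let domains : PySem.Set String :=
    match setup_parameters with
    | none => domains
    | some sp =>
      if sp ≠ [] ∧ PySem.Set.inter domains SETUP_DOMAINS ≠ [] then
        let setup_sections : PySem.Set String := PySem.Set.ofList (sp.map (fun kv => kv.1))
        if PySem.Set.inter setup_sections AERO_SECTIONS ≠ [] then
          PySem.Set.add domains "aero"
        else domains
      else domains
  PySem.List.sorted domains (fun d => DOMAIN_PRIORITY.getD d 99)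

-- ===== PORT B =====
def BALANCE_SIGNALS : PySem.Set String := PySem.Set.ofList
  ["high_understeer", "high_oversteer", "brake_balance_issue", "suspension_bottoming"]
def TYRE_SIGNALS : PySem.Set String := PySem.Set.ofList
  ["tyre_temp_spread_high", "tyre_temp_imbalance", "tyre_wear_rapid", "high_slip_angle", "lap_time_degradation"]
def TECHNIQUE_SIGNALS : PySem.Set String := PySem.Set.ofList
  ["brake_balance_issue", "low_consistency"]

def route_signals_alt (signals : List String) (setup_parameters : Option (List (String × List (String × String)))) : List String :=
  let balance := signals.any (fun s => PySem.Set.contains BALANCE_SIGNALS s)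
  let tyre := signals.any (fun s => PySem.Set.contains TYRE_SIGNALS s)
  let technique := signals.any (fun s => PySem.Set.contains TECHNIQUE_SIGNALS s)
  let aero :=
    match setup_parameters with
    | none => false
    | some sp => decide (sp ≠ []) && (balance || tyre) && sp.any (fun kv => PySem.Set.contains AERO_SECTIONS kv.1)
  ([("balance", balance), ("tyre", tyre), ("aero", aero), ("technique", technique)] : List (String × Bool)).filterMap
    (fun p => if p.2 then some p.1 else none)

-- ===== PRECONDITION & SPEC =====
def Spec_route_signals (signals : List String) (setup_parameters : Option (List (String × List (String × String)))) (out : List String) : Prop := out = route_signals_alt signals setup_parameters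
instance (signals : List String) (setup_parameters : Option (List (String × List (String × String)))) (out : List String) : Decidable (Spec_route_signals signals setup_parameters out) := by unfold Spec_route_signals; infer_instance

-- ===== CLAIM (what is proved, stated in full; the proofs are below) =====
def Claim_equal_route_signals : Prop := ∀ (signals : List String) (setup_parameters : Option (List (String × List (String × String)))), Dom_route_signals signals setup_parameters → Spec_route_signals signals setup_parameters (route_signals signals setup_parameters)

-- ===== LEMMAS AND PROOFS =====

lemma addFold_mem (l : List String) (ds : PySem.Set String) (x : String) :
    x ∈ l.foldl (fun ds domain => PySem.Set.add ds domain) ds ↔ x ∈ ds ∨ x ∈ l := by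
  induction l generalizing ds with
  | nil => simp
  | cons a t ih => simp [ih, PySem.Set.mem_add, List.mem_cons]; tauto

lemma addFold_nodup (l : List String) (ds : PySem.Set String) (h : ds.Nodup) :
    (l.foldl (fun ds domain => PySem.Set.add ds domain) ds).Nodup := by
  induction l generalizing ds with
  | nil => exact h
  | cons a t ih => exact ih _ (PySem.Set.nodup_add ds a h)

lemma sigFold_mem (signals : List String) (ds : PySem.Set String) (x : String) :
    x ∈ signals.foldl (fun ds signal =>
        (SIGNAL_DOMAINS.getD signal []).foldl (fun ds domain => PySem.Set.add ds domain) ds) ds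
      ↔ x ∈ ds ∨ ∃ s ∈ signals, x ∈ SIGNAL_DOMAINS.getD s [] := by
  induction signals generalizing ds with
  | nil => simp
  | cons a t ih => simp [ih, addFold_mem]; tauto

lemma sigFold_nodup (signals : List String) (ds : PySem.Set String) (h : ds.Nodup) :
    (signals.foldl (fun ds signal =>
        (SIGNAL_DOMAINS.getD signal []).foldl (fun ds domain => PySem.Set.add ds domain) ds) ds).Nodup := by
  induction signals generalizing ds with
  | nil => exact h
  | cons a t ih => exact ih _ (addFold_nodup _ _ h)

set_option maxHeartbeats 1000000 in
lemma getD_SD (s : String) : SIGNAL_DOMAINS.getD s [] =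
    if ("high_understeer" == s) = true then ["balance"]
    else if ("high_oversteer" == s) = true then ["balance"]
    else if ("brake_balance_issue" == s) = true then ["balance", "technique"]
    else if ("suspension_bottoming" == s) = true then ["balance"]
    else if ("tyre_temp_spread_high" == s) = true then ["tyre"]
    else if ("tyre_temp_imbalance" == s) = true then ["tyre"]
    else if ("tyre_wear_rapid" == s) = true then ["tyre"]
    else if ("high_slip_angle" == s) = true then ["tyre"]
    else if ("low_consistency" == s) = true then ["technique"]
    else if ("lap_time_degradation" == s) = true then ["tyre"]
    else [] := by
  simp only [SIGNAL_DOMAINS, PySem.Dict.getD, PySem.Dict.get?_mk_cons]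
  split_ifs <;> rfl

lemma domains_sub (s x : String) (h : x ∈ SIGNAL_DOMAINS.getD s []) :
    x = "balance" ∨ x = "tyre" ∨ x = "technique" := by
  rw [getD_SD] at h
  split_ifs at h <;> simp_all <;> tauto

lemma mem_bal (s : String) :
    ("balance" ∈ SIGNAL_DOMAINS.getD s []) ↔ PySem.Set.contains BALANCE_SIGNALS s = true := by
  rw [getD_SD, PySem.Set.contains_iff, BALANCE_SIGNALS, PySem.Set.mem_ofList]
  split_ifs <;> simp only [beq_iff_eq] at * <;> subst_vars <;> simp_all [ne_comm]

lemma mem_tyre (s : String) :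
    ("tyre" ∈ SIGNAL_DOMAINS.getD s []) ↔ PySem.Set.contains TYRE_SIGNALS s = true := by
  rw [getD_SD, PySem.Set.contains_iff, TYRE_SIGNALS, PySem.Set.mem_ofList]
  split_ifs <;> simp only [beq_iff_eq] at * <;> subst_vars <;> simp_all [ne_comm]

lemma mem_tech (s : String) :
    ("technique" ∈ SIGNAL_DOMAINS.getD s []) ↔ PySem.Set.contains TECHNIQUE_SIGNALS s = true := by
  rw [getD_SD, PySem.Set.contains_iff, TECHNIQUE_SIGNALS, PySem.Set.mem_ofList]
  split_ifs <;> simp only [beq_iff_eq] at * <;> subst_vars <;> simp_all [ne_comm]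

lemma sorted_canon (L : List String) (hnd : L.Nodup)
    (hsub : ∀ x ∈ L, x ∈ ["balance", "tyre", "aero", "technique"]) :
    PySem.List.sorted L (fun d => DOMAIN_PRIORITY.getD d 99) =
      ["balance", "tyre", "aero", "technique"].filter (fun d => decide (d ∈ L)) := by
  apply PySem.List.sorted_eq_of_perm_of_pairwise_lt
  · apply (List.perm_ext_iff_of_nodup (List.Nodup.filter _ (by decide)) hnd).mpr
    intro a
    simp only [List.mem_filter, decide_eq_true_eq]
    exact ⟨fun h => h.2, fun h => ⟨hsub a h, h⟩⟩
  · have hp : List.Pairwise (fun a b => DOMAIN_PRIORITY.getD a 99 < DOMAIN_PRIORITY.getD b 99)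
        ["balance", "tyre", "aero", "technique"] := by decide
    exact List.Pairwise.sublist List.filter_sublist hp

lemma interSetup (D : PySem.Set String) :
    PySem.Set.inter D SETUP_DOMAINS ≠ [] ↔ "balance" ∈ D ∨ "tyre" ∈ D := by
  rw [← List.isEmpty_eq_false_iff, List.isEmpty_eq_false_iff_exists_mem]
  constructor
  · rintro ⟨x, hx⟩
    rw [PySem.Set.mem_inter] at hx
    rcases hx with ⟨hD, hS⟩
    rw [SETUP_DOMAINS, PySem.Set.mem_ofList] at hS
    simp at hS
    rcases hS with h | h <;> subst h <;> tauto
  · rintro (h | h)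
    · exact ⟨"balance", (PySem.Set.mem_inter _ _ _).mpr ⟨h, by decide⟩⟩
    · exact ⟨"tyre", (PySem.Set.mem_inter _ _ _).mpr ⟨h, by decide⟩⟩

lemma interAero (sp : List (String × List (String × String))) :
    PySem.Set.inter (PySem.Set.ofList (sp.map (fun kv => kv.1))) AERO_SECTIONS ≠ [] ↔
      sp.any (fun kv => PySem.Set.contains AERO_SECTIONS kv.1) = true := by
  rw [← List.isEmpty_eq_false_iff, List.isEmpty_eq_false_iff_exists_mem, List.any_eq_true]
  constructor
  · rintro ⟨x, hx⟩
    rw [PySem.Set.mem_inter, PySem.Set.mem_ofList] at hx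
    rcases hx with ⟨hk, hA⟩
    rcases List.mem_map.mp hk with ⟨kv, hkv, rfl⟩
    exact ⟨kv, hkv, (PySem.Set.contains_iff _ _).mpr hA⟩
  · rintro ⟨kv, hkv, hA⟩
    exact ⟨kv.1, (PySem.Set.mem_inter _ _ _).mpr
      ⟨(PySem.Set.mem_ofList _ _).mpr (List.mem_map.mpr ⟨kv, hkv, rfl⟩),
       (PySem.Set.contains_iff _ _).mp hA⟩⟩

lemma assemble (D : PySem.Set String) (hnd : D.Nodup)
    (hsub : ∀ x ∈ D, x ∈ ["balance", "tyre", "aero", "technique"])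
    (b t a te : Bool)
    (hb : ("balance" ∈ D) ↔ b = true) (ht : ("tyre" ∈ D) ↔ t = true)
    (ha : ("aero" ∈ D) ↔ a = true) (hte : ("technique" ∈ D) ↔ te = true) :
    PySem.List.sorted D (fun d => DOMAIN_PRIORITY.getD d 99) =
      ([("balance", b), ("tyre", t), ("aero", a), ("technique", te)] : List (String × Bool)).filterMap
        (fun p => if p.2 then some p.1 else none) := by
  rw [sorted_canon D hnd hsub]
  cases b <;> cases t <;> cases a <;> cases te <;>
    simp_all [List.filter, List.filterMap]

-- ===== VERDICT (by name: the statement is the Claim_ definition above) =====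
theorem route_signals_spec : Claim_equal_route_signals := by
  intro signals sp _
  unfold Spec_route_signals
  simp only [route_signals, route_signals_alt]
  set D0 : PySem.Set String := signals.foldl (fun ds signal =>
      (SIGNAL_DOMAINS.getD signal []).foldl (fun ds domain => PySem.Set.add ds domain) ds)
      PySem.Set.empty with hD0
  have hmem : ∀ x, x ∈ D0 ↔ ∃ s ∈ signals, x ∈ SIGNAL_DOMAINS.getD s [] := by
    intro x; rw [hD0, sigFold_mem]; simp [PySem.Set.empty]
  have hnd : D0.Nodup := sigFold_nodup _ _ (by simp [PySem.Set.empty])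
  have hb : ("balance" ∈ D0) ↔ (signals.any (fun s => PySem.Set.contains BALANCE_SIGNALS s) = true) := by
    rw [hmem, List.any_eq_true]; simp only [mem_bal]
  have ht : ("tyre" ∈ D0) ↔ (signals.any (fun s => PySem.Set.contains TYRE_SIGNALS s) = true) := by
    rw [hmem, List.any_eq_true]; simp only [mem_tyre]
  have hte : ("technique" ∈ D0) ↔ (signals.any (fun s => PySem.Set.contains TECHNIQUE_SIGNALS s) = true) := by
    rw [hmem, List.any_eq_true]; simp only [mem_tech]
  have hna : "aero" ∉ D0 := by
    rw [hmem]
    rintro ⟨s, _, h⟩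
    rcases domains_sub s _ h with h' | h' | h' <;> simp at h'
  have hsub : ∀ x ∈ D0, x ∈ ["balance", "tyre", "aero", "technique"] := by
    intro x hx
    rcases domains_sub _ x ((hmem x).mp hx).choose_spec.2 with h | h | h <;> subst h <;> decide
  cases sp with
  | none =>
    dsimp only
    exact assemble D0 hnd hsub _ _ false _ hb ht (by simp [hna]) hte
  | some l =>
    dsimp only
    by_cases hc1 : l ≠ [] ∧ PySem.Set.inter D0 SETUP_DOMAINS ≠ []
    · rw [if_pos hc1]
      by_cases hc2 : PySem.Set.inter (PySem.Set.ofList (l.map (fun kv => kv.1))) AERO_SECTIONS ≠ []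
      · rw [if_pos hc2]
        refine assemble _ (PySem.Set.nodup_add _ _ hnd) ?_ _ _ _ _ ?_ ?_ ?_ ?_
        · intro x hx
          rcases (PySem.Set.mem_add _ _ _).mp hx with h | h
          · exact hsub x h
          · subst h; decide
        · rw [PySem.Set.mem_add]; simp [hb]
        · rw [PySem.Set.mem_add]; simp [ht]
        · rw [PySem.Set.mem_add]
          have hx : (decide (l ≠ []) &&
              ((signals.any fun s => PySem.Set.contains BALANCE_SIGNALS s) ||
                signals.any fun s => PySem.Set.contains TYRE_SIGNALS s) &&
              l.any fun kv => PySem.Set.contains AERO_SECTIONS kv.1) = true := by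
            rw [Bool.and_eq_true, Bool.and_eq_true, Bool.or_eq_true]
            exact ⟨⟨by simp [hc1.1], by rw [← hb, ← ht]; exact (interSetup D0).mp hc1.2⟩,
                   (interAero l).mp hc2⟩
          rw [hx]
          simp
        · rw [PySem.Set.mem_add]; simp [hte]
      · rw [if_neg hc2]
        refine assemble D0 hnd hsub _ _ _ _ hb ht ?_ hte
        simp only [hna, false_iff]
        intro h'
        rw [Bool.and_eq_true] at h'
        exact hc2 ((interAero l).mpr h'.2)
    · rw [if_neg hc1]
      refine assemble D0 hnd hsub _ _ _ _ hb ht ?_ hte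
      simp only [hna, false_iff]
      rw [not_and_or] at hc1
      rcases hc1 with h | h
      · rw [not_not] at h; simp [h]
      · rw [interSetup, hb, ht] at h
        intro h'
        rw [Bool.and_eq_true, Bool.and_eq_true, Bool.or_eq_true] at h'
        exact h h'.1.2
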